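-- pv_equiv track=rewrite | github.com/shiftshapr/agent-lab | scripts/pacha-slate-github-bootstrap/setup_github_api.py | _looks_like_masked_x_only_token
-- ===== SOURCE A (Python) =====
-- def _looks_like_masked_x_only_token(t: str) -> bool:
--     """True if value looks like doc shorthand ghp_xxxx… (all x), not a real PAT."""
--     low = t.lower()
--     if low.startswith("ghp_"):
--         core = t[4:]
--     elif low.startswith("github_pat_"):
--         core = t[11:]
--     else:
--         return False
--     if len(core) > 32:
--         return False
--     core_nounderscore = core.replace("_", "")
--     return bool(core_nounderscore) and all(c == "x" for c in core_nounderscore.lower())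
-- ===== SOURCE B (Python) =====
-- import re
--
-- # One pattern-engine pass: prefix alternation, a lookahead demanding an 'x'
-- # after any leading underscores, and a {1,32}-bounded [x_] core.
-- _MASKED_RE = re.compile(r"(?:ghp_|github_pat_)(?=_*x)[x_]{1,32}\Z", re.IGNORECASE)
--
-- def _looks_like_masked_x_only_token(t: str) -> bool:
--     """True if value looks like doc shorthand ghp_xxxx… (all x), not a real PAT."""
--     return _MASKED_RE.match(t) is not None
-- ===== Notes on version B (the rewrite author's own statement) =====
-- stated objective: idiomatic
-- what changed: Replaced the explicit prefix-slice, length guard, underscore-strip and all() scan with a single precompiled case-insensitive regex fullmatch: prefix alternation, a lookahead requiring an x after leading underscores, and a {1,32}-bounded [x_] core.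
import Mathlib
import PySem

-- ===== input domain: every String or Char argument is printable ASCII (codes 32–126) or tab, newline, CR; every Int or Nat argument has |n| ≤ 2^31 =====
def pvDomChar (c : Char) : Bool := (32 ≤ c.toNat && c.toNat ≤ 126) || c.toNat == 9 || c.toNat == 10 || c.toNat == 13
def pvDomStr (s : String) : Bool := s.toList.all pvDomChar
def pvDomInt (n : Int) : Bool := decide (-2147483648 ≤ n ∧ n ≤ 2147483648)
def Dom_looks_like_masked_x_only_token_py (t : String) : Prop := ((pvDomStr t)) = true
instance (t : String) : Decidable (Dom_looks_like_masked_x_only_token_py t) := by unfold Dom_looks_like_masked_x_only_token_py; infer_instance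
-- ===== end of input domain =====

-- B replaces A's prefix-slice + length guard + underscore-strip + all() scan by one
-- case-insensitive regex fullmatch (idiomatic); same return value on every input.

-- ===== PORT A =====
-- shared tail of A after 'core' is computed (the code after the if/elif/else)
def pvACore (core : String) : Bool :=
  if PySem.Str.len core > 32 then false
  else
    let cn := PySem.Str.replace core "_" ""
    (!(PySem.Str.len cn == 0)) && (PySem.Str.lower cn).toList.all (fun c => c == 'x')

def looks_like_masked_x_only_token_py (t : String) : Bool :=
  let low := PySem.Str.lower t
  if PySem.Str.startswith low "ghp_" then
    pvACore (PySem.Str.slice t (some 4) none)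
  else if PySem.Str.startswith low "github_pat_" then
    pvACore (PySem.Str.slice t (some 11) none)
  else
    false

-- ===== PORT B =====
-- B is a single regex:  (?:ghp_|github_pat_)(?=_*x)[x_]{1,32}\Z  with re.IGNORECASE,
-- ported by hand component by component (no regex engine in Lean); exact on this
-- pattern: the alternation tries 'ghp_' then 'github_pat_' (they are mutually
-- exclusive), the IGNORECASE prefix compares the lowercased char with the lowercase
-- pattern char, the lookahead (?=_*x) demands that the first non-underscore char is
-- x/X, and [x_]{1,32}\Z demands the whole remainder be in the class with length 1..32.

-- consume pattern chars (given in lowercase) case-insensitively; return the rest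
def pvReCI : List Char → List Char → Option (List Char)
  | [], cs => some cs
  | _ :: _, [] => none
  | p :: ps, c :: cs => if PySem.Chars.lowerChar c == p then pvReCI ps cs else none

-- character class [x_] under IGNORECASE
def pvReClass (c : Char) : Bool := c == 'x' || c == 'X' || c == '_'

-- lookahead (?=_*x) under IGNORECASE
def pvReLookahead (core : List Char) : Bool :=
  match (core.dropWhile (fun c => c == '_')).head? with
  | some c => c == 'x' || c == 'X'
  | none => false

def looks_like_masked_x_only_token_py_alt (t : String) : Bool :=
  let cs := t.toList
  match (pvReCI "ghp_".toList cs).orElse (fun _ => pvReCI "github_pat_".toList cs) with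
  | none => false
  | some core =>
      pvReLookahead core && core.all pvReClass &&
        decide (1 ≤ core.length) && decide (core.length ≤ 32)

-- ===== PRECONDITION & SPEC =====
def Spec_looks_like_masked_x_only_token_py (t : String) (out : Bool) : Prop := out = looks_like_masked_x_only_token_py_alt t
instance (t : String) (out : Bool) : Decidable (Spec_looks_like_masked_x_only_token_py t out) := by unfold Spec_looks_like_masked_x_only_token_py; infer_instance

-- ===== CLAIM (what is proved, stated in full; the proofs are below) =====
def Claim_equal_looks_like_masked_x_only_token_py : Prop := ∀ (t : String), Dom_looks_like_masked_x_only_token_py t → Spec_looks_like_masked_x_only_token_py t (looks_like_masked_x_only_token_py t)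

-- ===== LEMMAS AND PROOFS =====

-- the case-insensitive prefix consumer is 'startswith on the lowercased string'
lemma pvReCI_eq (p cs : List Char) :
    pvReCI p cs =
      if p.isPrefixOf (List.map PySem.Chars.lowerChar cs) then some (cs.drop p.length) else none := by
  induction p generalizing cs with
  | nil => simp [pvReCI]
  | cons q qs ih =>
    cases cs with
    | nil => simp [pvReCI]
    | cons c cs' =>
      by_cases h : PySem.Chars.lowerChar c = q
      · simp [pvReCI, h, ih]
      · simp [pvReCI, h, Ne.symm h]

lemma pv_char_eq_of_toNat_eq {c d : Char} (h : c.toNat = d.toNat) : c = d :=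
  Char.ext (UInt32.toNat_inj.mp h)

lemma pv_char_toNat_ofNat_valid (n : Nat) (h : Nat.isValidChar n) : (Char.ofNat n).toNat = n := by
  rw [Char.ofNat, dif_pos h]
  rfl

lemma pv_lowerChar_eq_x_iff (c : Char) :
    PySem.Chars.lowerChar c = 'x' ↔ (c = 'x' ∨ c = 'X') := by
  unfold PySem.Chars.lowerChar PySem.Chars.isupper
  by_cases h : ('A' ≤ c ∧ c ≤ 'Z')
  · have h65 : 65 ≤ c.toNat := by
      have := h.1; rw [Char.le_def, UInt32.le_iff_toNat_le] at this; exact this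
    have h90 : c.toNat ≤ 90 := by
      have := h.2; rw [Char.le_def, UInt32.le_iff_toNat_le] at this; exact this
    have hvalid : Nat.isValidChar (c.toNat + 32) := Or.inl (by omega)
    rw [if_pos (by simp [h.1, h.2])]
    constructor
    · intro hx
      right
      have hv : (Char.ofNat (c.toNat + 32)).toNat = ('x' : Char).toNat := by rw [hx]
      rw [pv_char_toNat_ofNat_valid _ hvalid] at hv
      have hx120 : ('x' : Char).toNat = 120 := rfl
      have hc : c.toNat = ('X' : Char).toNat := by
        have hX : ('X' : Char).toNat = 88 := rfl
        omega
      exact pv_char_eq_of_toNat_eq hc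
    · rintro (h' | h')
      · subst h'
        exact absurd h90 (by decide)
      · subst h'
        apply pv_char_eq_of_toNat_eq
        rw [pv_char_toNat_ofNat_valid _ hvalid]
        rfl
  · rw [if_neg (by simpa [Bool.and_eq_true, decide_eq_true_eq] using h)]
    constructor
    · intro hx; exact Or.inl hx
    · rintro (h' | h')
      · exact h'
      · subst h'
        exact absurd ⟨by decide, by decide⟩ h

-- 'replace core "_" ""' is filtering out the underscores
lemma pv_replace_go_underscore (l : List Char) (acc : List Char) (fuel : Nat)
    (h : l.length ≤ fuel) :
    PySem.Chars.replace.go ['_'] [] fuel l acc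
      = acc.reverse ++ l.filter (fun c => !(c == '_')) := by
  induction l generalizing fuel acc with
  | nil => cases fuel <;> simp [PySem.Chars.replace.go]
  | cons c t ih =>
    cases fuel with
    | zero => simp at h
    | succ fuel =>
      simp only [List.length_cons, Nat.succ_le_succ_iff] at h
      by_cases hc : c = '_'
      · subst hc
        rw [PySem.Chars.replace.go]
        simp [List.isPrefixOf, ih _ _ h]
      · rw [PySem.Chars.replace.go]
        simp [List.isPrefixOf, Ne.symm hc, hc, ih _ _ h]

lemma pv_replace_underscore (cs : List Char) :
    PySem.Chars.replace cs ['_'] [] = cs.filter (fun c => !(c == '_')) := by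
  rw [PySem.Chars.replace]
  simp [pv_replace_go_underscore cs [] cs.length le_rfl]

lemma pv_head_dropWhile_false {alpha : Type} (p : alpha → Bool) (l : List alpha) (d : alpha)
    (ds : List alpha) (h : l.dropWhile p = d :: ds) : p d = false := by
  induction l generalizing ds with
  | nil => simp at h
  | cons a t ih =>
    rw [List.dropWhile_cons] at h
    by_cases hp : p a = true
    · rw [if_pos hp] at h; exact ih _ h
    · rw [if_neg hp] at h
      injection h with h1 _
      subst h1
      simpa using hp

-- the propositional heart: A's strip-and-scan ⇔ B's lookahead + character class
lemma pv_core_iff (cs : List Char) :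
    (¬ cs.filter (fun c => !(c == '_')) = [] ∧
      ∀ c ∈ cs.filter (fun c => !(c == '_')), PySem.Chars.lowerChar c = 'x')
    ↔ (pvReLookahead cs = true ∧ ∀ c ∈ cs, pvReClass c = true) := by
  constructor
  · rintro ⟨hne, hall⟩
    have hP : ∀ c ∈ cs, c ≠ '_' → (c = 'x' ∨ c = 'X') := by
      intro c hc hcu
      exact (pv_lowerChar_eq_x_iff c).1 (hall c (List.mem_filter.2 ⟨hc, by simp [hcu]⟩))
    have hdw : ¬ cs.dropWhile (fun c => c == '_') = [] := by
      intro hd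
      apply hne
      rw [List.filter_eq_nil_iff]
      intro a ha
      have := (List.dropWhile_eq_nil_iff).1 hd a ha
      simpa using this
    constructor
    · unfold pvReLookahead
      obtain ⟨d, ds, hds⟩ := List.exists_cons_of_ne_nil hdw
      have hdm : d ∈ cs := List.dropWhile_subset _ (by rw [hds]; exact List.mem_cons_self)
      have hdu : (d == '_') = false := pv_head_dropWhile_false _ cs d ds hds
      have := hP d hdm (by simpa using hdu)
      rw [hds]
      simp only [List.head?_cons]
      rcases this with h' | h' <;> simp [h']
    · intro c hc
      by_cases hcu : c = '_'
      · simp [pvReClass, hcu]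
      · rcases hP c hc hcu with h' | h' <;> simp [pvReClass, h']
  · rintro ⟨hla, hcls⟩
    have hdw : ¬ cs.dropWhile (fun c => c == '_') = [] := by
      intro hd
      unfold pvReLookahead at hla
      rw [hd] at hla
      simp at hla
    constructor
    · intro hf
      apply hdw
      rw [List.dropWhile_eq_nil_iff]
      intro a ha
      have := (List.filter_eq_nil_iff).1 hf a ha
      simpa using this
    · intro c hc
      have hcm : c ∈ cs := (List.mem_filter.1 hc).1
      have hcu : ¬ (c == '_') = true := by simpa using (List.mem_filter.1 hc).2
      have := hcls c hcm
      unfold pvReClass at this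
      rw [pv_lowerChar_eq_x_iff]
      simp only [Bool.or_eq_true, beq_iff_eq] at this
      rcases this with (h' | h') | h'
      · exact Or.inl h'
      · exact Or.inr h'
      · exact absurd (by simp [h'] : (c == '_') = true) hcu

-- A's shared tail equals B's regex tail on the same core
lemma pvACore_eq_regex_tail (core : String) :
    pvACore core =
      (pvReLookahead core.toList && core.toList.all pvReClass &&
        decide (1 ≤ core.toList.length) && decide (core.toList.length ≤ 32)) := by
  show (if PySem.Str.len core > 32 then false
    else (!(PySem.Str.len (PySem.Str.replace core "_" "") == 0)) &&
      (PySem.Str.lower (PySem.Str.replace core "_" "")).toList.all (fun c => c == 'x')) = _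
  rw [PySem.Str.len_eq]
  by_cases h32 : (core.toList.length : Int) > 32
  · rw [if_pos h32]
    have hdec : decide (core.toList.length ≤ 32) = false := by
      rw [decide_eq_false_iff_not]
      omega
    rw [hdec, Bool.and_false]
  · rw [if_neg h32]
    have h32' : core.toList.length ≤ 32 := by omega
    have hrep : (PySem.Str.replace core "_" "").toList
        = core.toList.filter (fun c => !(c == '_')) := by
      rw [PySem.Str.toList_replace]
      rw [show ("_" : String).toList = ['_'] from rfl]
      rw [show ("" : String).toList = [] from rfl]
      exact pv_replace_underscore core.toList
    rw [PySem.Str.len_eq, PySem.Str.toList_lower, hrep, PySem.Chars.lower]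
    rw [Bool.eq_iff_iff]
    simp only [Bool.and_eq_true, Bool.not_eq_true', beq_eq_false_iff_ne, ne_eq,
      List.all_map, List.all_eq_true, Function.comp, beq_iff_eq, decide_eq_true_eq]
    constructor
    · rintro ⟨hne, hall⟩
      have hne' : ¬ core.toList.filter (fun c => !(c == '_')) = [] := by
        intro h'
        apply hne
        rw [h']
        rfl
      obtain ⟨hla, hcls⟩ := (pv_core_iff core.toList).1 ⟨hne', hall⟩
      refine ⟨⟨⟨hla, hcls⟩, ?_⟩, h32'⟩
      rcases List.exists_cons_of_ne_nil hne' with ⟨d, ds, hds⟩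
      have hd : d ∈ core.toList :=
        (List.mem_filter.1 (by rw [hds]; exact List.mem_cons_self)).1
      have := List.length_pos_of_mem hd
      omega
    · rintro ⟨⟨⟨hla, hcls⟩, _⟩, _⟩
      obtain ⟨hne', hall'⟩ := (pv_core_iff core.toList).2 ⟨hla, hcls⟩
      refine ⟨?_, hall'⟩
      intro h'
      apply hne'
      exact_mod_cast List.length_eq_zero_iff.1 (by exact_mod_cast h')

-- ===== VERDICT (by name: the statement is the Claim_ definition above) =====
theorem looks_like_masked_x_only_token_py_spec : Claim_equal_looks_like_masked_x_only_token_py := by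
  intro t _
  unfold Spec_looks_like_masked_x_only_token_py
  show (if PySem.Str.startswith (PySem.Str.lower t) "ghp_" then
      pvACore (PySem.Str.slice t (some 4) none)
    else if PySem.Str.startswith (PySem.Str.lower t) "github_pat_" then
      pvACore (PySem.Str.slice t (some 11) none)
    else false)
    = (match (pvReCI "ghp_".toList t.toList).orElse (fun _ => pvReCI "github_pat_".toList t.toList) with
      | none => false
      | some core =>
          pvReLookahead core && core.all pvReClass &&
            decide (1 ≤ core.length) && decide (core.length ≤ 32))
  rw [pvReCI_eq, pvReCI_eq]
  rw [PySem.Str.startswith_eq, PySem.Str.startswith_eq, PySem.Str.toList_lower]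
  rw [show ("ghp_" : String).toList = ['g','h','p','_'] from rfl]
  rw [show ("github_pat_" : String).toList = ['g','i','t','h','u','b','_','p','a','t','_'] from rfl]
  simp only [PySem.Chars.startswith, PySem.Chars.lower]
  by_cases h1 : (['g','h','p','_'].isPrefixOf (t.toList.map PySem.Chars.lowerChar)) = true
  · rw [if_pos h1, if_pos h1]
    have hslice : (PySem.Str.slice t (some 4) none).toList = t.toList.drop 4 := by
      rw [PySem.Str.toList_slice, PySem.Chars.slice_eq_listSlice]
      exact PySem.List.slice_from_natCast t.toList 4
    simp only [Option.orElse, List.length_cons, List.length_nil]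
    rw [pvACore_eq_regex_tail, hslice]
  · rw [if_neg h1, if_neg h1]
    by_cases h2 : (['g','i','t','h','u','b','_','p','a','t','_'].isPrefixOf (t.toList.map PySem.Chars.lowerChar)) = true
    · rw [if_pos h2, if_pos h2]
      have hslice : (PySem.Str.slice t (some 11) none).toList = t.toList.drop 11 := by
        rw [PySem.Str.toList_slice, PySem.Chars.slice_eq_listSlice]
        exact PySem.List.slice_from_natCast t.toList 11
      simp only [Option.orElse, List.length_cons, List.length_nil]
      rw [pvACore_eq_regex_tail, hslice]
    · rw [if_neg h2, if_neg h2]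
      simp [Option.orElse]
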